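-- pv_equiv track=rewrite | github.com/zenniskayy2k4/CTF-Archive | Olympic/Beshcan/solve.py | multiply_matrix_vector
-- ===== SOURCE A (Python) =====
-- def multiply_matrix_vector(matrix, vector):
--     result = [0] * len(matrix)
--     for i in range(len(matrix)):
--         dot_product = 0
--         for j in range(len(vector)):
--             dot_product ^= matrix[i][j] & vector[j]
--         result[i] = dot_product
--     return result
-- ===== SOURCE B (Python) =====
-- def _dot(row, vector, lo, hi):
--     # Balanced divide-and-conquer XOR reduction of row[j] & vector[j] over j in [lo, hi).
--     if hi - lo == 0:
--         return 0
--     if hi - lo == 1: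
--         return row[lo] & vector[lo]
--     mid = (lo + hi) // 2
--     return _dot(row, vector, lo, mid) ^ _dot(row, vector, mid, hi)
--
-- def multiply_matrix_vector(matrix, vector):
--     n = len(vector)
--     return [_dot(row, vector, 0, n) for row in matrix]
-- ===== Notes on version B (the rewrite author's own statement) =====
-- stated objective: alternative
-- what changed: Instead of an index loop with a mutable result array and a left-to-right scalar accumulator per row, B maps over the rows and computes each XOR-AND dot product by a balanced divide-and-conquer reduction over index halves, correct by associativity of XOR.
import Mathlib
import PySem

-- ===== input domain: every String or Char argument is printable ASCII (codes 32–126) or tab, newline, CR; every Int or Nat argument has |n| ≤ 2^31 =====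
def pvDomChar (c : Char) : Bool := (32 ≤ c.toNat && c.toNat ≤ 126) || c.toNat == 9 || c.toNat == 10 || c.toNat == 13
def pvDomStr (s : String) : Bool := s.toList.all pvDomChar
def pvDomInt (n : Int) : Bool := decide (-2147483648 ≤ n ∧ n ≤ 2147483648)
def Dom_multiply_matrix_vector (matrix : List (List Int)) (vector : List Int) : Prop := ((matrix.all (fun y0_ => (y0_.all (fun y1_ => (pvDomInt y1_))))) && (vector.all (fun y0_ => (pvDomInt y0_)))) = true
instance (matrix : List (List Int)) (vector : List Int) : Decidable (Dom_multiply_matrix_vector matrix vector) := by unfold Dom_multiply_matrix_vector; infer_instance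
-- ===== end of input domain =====

-- B replaces A's index loop + mutable result array by a map over rows with a balanced
-- divide-and-conquer XOR reduction per dot product (correct by associativity of XOR);
-- same asymptotic cost, alternative structure.


-- ===== PORT A =====
-- row-major: for each row i, accumulate a scalar XOR dot product left to right, store it at result[i]
def multiply_matrix_vector (matrix : List (List Int)) (vector : List Int) : List Int :=
  (List.range matrix.length).foldl
    (fun result i =>
      result.set i
        ((List.range vector.length).foldl
          (fun dot_product j =>
            PySem.Int.bxor dot_product
              (PySem.Int.band ((matrix.getD i []).getD j 0) (vector.getD j 0)))
          0))
    (List.replicate matrix.length 0)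

-- ===== PORT B =====
-- balanced divide-and-conquer XOR reduction of row[j] & vector[j] over j ∈ [lo, hi)
-- (lo, hi are the Python helper's nonnegative int bounds, carried as Nat; (lo+hi)//2 = (lo+hi)/2 on Nat)
def dotDC (row vector : List Int) (lo hi : Nat) : Int :=
  if hi - lo = 0 then 0
  else if hi - lo = 1 then PySem.Int.band (row.getD lo 0) (vector.getD lo 0)
  else
    PySem.Int.bxor (dotDC row vector lo ((lo + hi) / 2)) (dotDC row vector ((lo + hi) / 2) hi)
termination_by hi - lo
decreasing_by all_goals omega

def multiply_matrix_vector_alt (matrix : List (List Int)) (vector : List Int) : List Int :=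
  matrix.map (fun row => dotDC row vector 0 vector.length)

-- ===== PRECONDITION & SPEC =====
-- Pre_ excludes exactly the inputs where Python A raises IndexError: some row shorter than the vector.
def Pre_multiply_matrix_vector (matrix : List (List Int)) (vector : List Int) : Prop :=
  ∀ row ∈ matrix, vector.length ≤ row.length
instance (matrix : List (List Int)) (vector : List Int) : Decidable (Pre_multiply_matrix_vector matrix vector) := by unfold Pre_multiply_matrix_vector; infer_instance

def pvWitness_multiply_matrix_vector : List (List Int) × List Int := ([[1, 0, 1], [0, 1, 1]], [3, 5, 6])

def Spec_multiply_matrix_vector (matrix : List (List Int)) (vector : List Int) (out : List Int) : Prop := out = multiply_matrix_vector_alt matrix vector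
instance (matrix : List (List Int)) (vector : List Int) (out : List Int) : Decidable (Spec_multiply_matrix_vector matrix vector out) := by unfold Spec_multiply_matrix_vector; infer_instance

-- ===== CLAIM (what is proved, stated in full; the proofs are below) =====
def Claim_equal_multiply_matrix_vector : Prop := ∀ (matrix : List (List Int)) (vector : List Int), Dom_multiply_matrix_vector matrix vector → Pre_multiply_matrix_vector matrix vector → Spec_multiply_matrix_vector matrix vector (multiply_matrix_vector matrix vector)

-- ===== LEMMAS AND PROOFS =====

theorem bxor_zero_left (a : Int) : PySem.Int.bxor 0 a = a := by
  rw [PySem.Int.bxor_comm]; simp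

theorem bxor_nN (m n : Nat) : PySem.Int.bxor ↑m (Int.negSucc n) = Int.negSucc (m ^^^ n) := by
  have h1 : ¬ (0:Int) ≤ Int.negSucc n := by omega
  have h2 : (-(Int.negSucc n) - 1).toNat = n := by omega
  rw [PySem.Int.bxor, if_pos (by omega : (0:Int) ≤ ↑m), if_neg h1, h2, Int.toNat_natCast,
    Int.negSucc_eq]
  omega

theorem bxor_Nn (m n : Nat) : PySem.Int.bxor (Int.negSucc m) ↑n = Int.negSucc (m ^^^ n) := by
  have h1 : ¬ (0:Int) ≤ Int.negSucc m := by omega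
  have h2 : (-(Int.negSucc m) - 1).toNat = m := by omega
  rw [PySem.Int.bxor, if_neg h1, if_pos (by omega : (0:Int) ≤ ↑n), h2, Int.toNat_natCast,
    Int.negSucc_eq]
  omega

theorem bxor_NN (m n : Nat) : PySem.Int.bxor (Int.negSucc m) (Int.negSucc n) = ↑(m ^^^ n) := by
  have h1 : ¬ (0:Int) ≤ Int.negSucc m := by omega
  have h2 : ¬ (0:Int) ≤ Int.negSucc n := by omega
  have h3 : (-(Int.negSucc m) - 1).toNat = m := by omega
  have h4 : (-(Int.negSucc n) - 1).toNat = n := by omega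
  rw [PySem.Int.bxor, if_neg h1, if_neg h2, h3, h4]

theorem bxor_assoc' (a b c : Int) :
    PySem.Int.bxor (PySem.Int.bxor a b) c = PySem.Int.bxor a (PySem.Int.bxor b c) := by
  rcases a with m | m <;> rcases b with n | n <;> rcases c with k | k <;>
    simp only [Int.ofNat_eq_natCast, PySem.Int.bxor_natCast, bxor_nN, bxor_Nn, bxor_NN,
      Nat.xor_assoc]

-- right-associated XOR of f over an index list
def gfold (f : Nat → Int) (l : List Nat) : Int :=
  l.foldr (fun j a => PySem.Int.bxor (f j) a) 0

theorem gfold_append (f : Nat → Int) (l₁ l₂ : List Nat) :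
    gfold f (l₁ ++ l₂) = PySem.Int.bxor (gfold f l₁) (gfold f l₂) := by
  induction l₁ with
  | nil => simp [gfold, bxor_zero_left]
  | cons a l ih => simp [gfold, List.foldr_cons] at ih ⊢; rw [ih, bxor_assoc']

theorem foldl_to_gfold (f : Nat → Int) (l : List Nat) :
    ∀ acc, l.foldl (fun d j => PySem.Int.bxor d (f j)) acc = PySem.Int.bxor acc (gfold f l) := by
  induction l with
  | nil => intro acc; simp [gfold]
  | cons a l ih => intro acc; rw [List.foldl_cons, ih, bxor_assoc']; rfl

theorem dotDC_eq (row vector : List Int) :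
    ∀ n lo, dotDC row vector lo (lo + n)
      = gfold (fun j => PySem.Int.band (row.getD j 0) (vector.getD j 0)) (List.range' lo n) := by
  intro n
  induction n using Nat.strong_induction_on with
  | _ n ih =>
    intro lo
    match n, ih with
    | 0, _ => simp [dotDC, gfold]
    | 1, _ => unfold dotDC; simp [gfold]
    | (m+2), ih =>
      unfold dotDC
      rw [if_neg (by omega), if_neg (by omega)]
      have hmid : (lo + (lo + (m+2))) / 2 = lo + (m+2)/2 := by omega
      have hk : (m+2)/2 < m+2 := by omega
      have hk2 : (m+2) - (m+2)/2 < m+2 := by omega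
      have h1 := ih ((m+2)/2) hk lo
      have h2 := ih ((m+2) - (m+2)/2) hk2 (lo + (m+2)/2)
      rw [hmid]
      have hhi : lo + (m+2)/2 + ((m+2) - (m+2)/2) = lo + (m+2) := by omega
      rw [hhi] at h2
      rw [h1, h2, ← gfold_append]
      congr 1
      have hsplit : List.range' lo ((m+2)/2) 1 ++ List.range' (lo + 1 * ((m+2)/2)) ((m+2) - (m+2)/2) 1
          = List.range' lo ((m+2)/2 + ((m+2) - (m+2)/2)) 1 := List.range'_append
      simp only [Nat.one_mul] at hsplit
      rw [(by omega : (m+2)/2 + ((m+2) - (m+2)/2) = m+2)] at hsplit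
      exact hsplit

-- a pass of `set` updates preserves length
theorem setLoop_length (g : Nat → Int → Int) :
    ∀ (l : List Nat) (r : List Int),
      (l.foldl (fun r i => r.set i (g i (r.getD i 0))) r).length = r.length := by
  intro l
  induction l with
  | nil => intro r; rfl
  | cons a l ih => intro r; rw [List.foldl_cons, ih, List.length_set]

-- One set-loop pass over indices 0..n-1, each entry i updated from its own current value.
theorem setLoop_getElem? (g : Nat → Int → Int) (n : Nat) :
    ∀ (r : List Int), n ≤ r.length → ∀ (k : Nat),
      ((List.range n).foldl (fun r i => r.set i (g i (r.getD i 0))) r)[k]? =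
        if k < n then some (g k (r.getD k 0)) else r[k]? := by
  induction n with
  | zero => intro r _ k; simp
  | succ n ih =>
    intro r hn k
    rw [List.range_succ, List.foldl_append, List.foldl_cons, List.foldl_nil]
    have hlen : n ≤ r.length := Nat.le_of_succ_le hn
    have hprev := ih r hlen
    have hLlen : ((List.range n).foldl (fun r i => r.set i (g i (r.getD i 0))) r).length = r.length :=
      setLoop_length g (List.range n) r
    have hLn : ((List.range n).foldl (fun r i => r.set i (g i (r.getD i 0))) r)[n]? = r[n]? := by
      rw [hprev n, if_neg (by omega)]
    have hLgetD : ((List.range n).foldl (fun r i => r.set i (g i (r.getD i 0))) r).getD n 0 = r.getD n 0 := by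
      rw [List.getD_eq_getElem?_getD, List.getD_eq_getElem?_getD, hLn]
    rw [hLgetD, List.getElem?_set, hLlen]
    by_cases hkn : n = k
    · subst hkn
      rw [if_pos rfl, if_pos (by omega), if_pos (by omega)]
    · rw [if_neg hkn, hprev k]
      by_cases hk : k < n
      · rw [if_pos hk, if_pos (by omega)]
      · rw [if_neg hk, if_neg (by omega)]

-- Port A: element k of the result is the row-k XOR dot product (left fold).
theorem portA_getElem? (matrix : List (List Int)) (vector : List Int) (k : Nat) :
    (multiply_matrix_vector matrix vector)[k]? =
      if k < matrix.length then
        some ((List.range vector.length).foldl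
          (fun d j => PySem.Int.bxor d
            (PySem.Int.band ((matrix.getD k []).getD j 0) (vector.getD j 0))) 0)
      else none := by
  unfold multiply_matrix_vector
  have h := setLoop_getElem?
    (fun i _ => (List.range vector.length).foldl
      (fun d j => PySem.Int.bxor d
        (PySem.Int.band ((matrix.getD i []).getD j 0) (vector.getD j 0))) 0)
    matrix.length (List.replicate matrix.length 0) (by simp) k
  beta_reduce at h
  rw [h]
  by_cases hk : k < matrix.length
  · rw [if_pos hk, if_pos hk]
  · rw [if_neg hk, if_neg hk, List.getElem?_eq_none_iff.mpr (by simpa using Nat.le_of_not_lt hk)]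

-- ===== VERDICT (by name: the statement is the Claim_ definition above) =====
theorem multiply_matrix_vector_spec : Claim_equal_multiply_matrix_vector := by
  intro matrix vector _ _
  unfold Spec_multiply_matrix_vector multiply_matrix_vector_alt
  apply List.ext_getElem?
  intro k
  rw [portA_getElem?, List.getElem?_map]
  by_cases hk : k < matrix.length
  · rw [if_pos hk, List.getElem?_eq_getElem hk, Option.map_some]
    have hd := dotDC_eq (matrix[k]) vector vector.length 0
    rw [Nat.zero_add] at hd
    rw [hd, foldl_to_gfold, bxor_zero_left, List.range_eq_range']
    have : matrix.getD k [] = matrix[k] := by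
      rw [List.getD_eq_getElem?_getD, List.getElem?_eq_getElem hk]; rfl
    rw [this]
  · rw [if_neg hk, List.getElem?_eq_none_iff.mpr (by omega), Option.map_none]
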